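-- pv_equiv track=rewrite | github.com/tyday/AdventOfCode2019 | Day04/Day04.py | has_repeating_number
-- ===== SOURCE A (Python) =====
-- def has_repeating_number(number, mini, maxi):
--     numb = str(number)
--     check = {}
--     for i in range(len(numb)):
--         if (i < len(numb)-1 and numb[i] > numb[i+1]):
--             return False
--         elif numb[i] in check:
--             check[numb[i] ] += 1
--         else:
--             check[numb[i] ] = 1
--     # longest = 0
--     # for k, v in check.items():
--     #     if v > longest:
--     #         longest = v
--     # if mini <= longest <= maxi:
--     for k, v in check.items():
--         if mini <= v <= maxi:
--             return True
--     return False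
-- ===== SOURCE B (Python) =====
-- def has_repeating_number(number, mini, maxi):
--     s = str(number)
--     # pass 1: digits must be non-decreasing
--     if any(a > b for a, b in zip(s, s[1:])):
--         return False
--     # pass 2: run-lengths of consecutive equal characters
--     runs = []
--     run = 1
--     for a, b in zip(s, s[1:]):
--         if a == b:
--             run += 1
--         else:
--             runs.append(run)
--             run = 1
--     runs.append(run)
--     return any(mini <= r <= maxi for r in runs)
-- ===== Notes on version B (the rewrite author's own statement) =====
-- stated objective: idiomatic
-- what changed: Replaced A's single fused loop (monotonicity check interleaved with a per-character dict counter, then a scan of the dict's values) by two plain passes: first validate that the digits are non-decreasing over adjacent pairs, then compute consecutive run lengths with a run-length accumulator and test any of them against [mini, maxi]; no dictionary at all.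
import Mathlib
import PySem

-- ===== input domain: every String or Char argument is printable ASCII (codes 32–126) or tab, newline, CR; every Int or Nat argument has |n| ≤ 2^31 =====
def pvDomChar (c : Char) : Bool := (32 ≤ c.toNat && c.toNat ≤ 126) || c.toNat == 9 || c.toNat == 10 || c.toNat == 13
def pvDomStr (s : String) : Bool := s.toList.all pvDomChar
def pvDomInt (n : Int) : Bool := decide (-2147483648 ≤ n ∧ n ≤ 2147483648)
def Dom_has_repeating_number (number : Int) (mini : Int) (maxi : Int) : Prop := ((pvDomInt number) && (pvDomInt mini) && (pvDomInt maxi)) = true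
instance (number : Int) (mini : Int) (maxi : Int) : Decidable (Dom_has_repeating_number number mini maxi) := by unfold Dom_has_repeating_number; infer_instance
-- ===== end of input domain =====

-- B replaces A's fused loop (monotonicity check interleaved with a dict counter, then a scan of
-- the dict's values) by two plain passes: validate non-decreasing adjacent digits, then compute
-- consecutive run lengths and test any of them against [mini, maxi] (objective: idiomatic).


-- ===== PORT A =====
-- 'if numb[i] in check: check[numb[i]] += 1 else: check[numb[i]] = 1'
def pvBumpA (check : PySem.Dict Char Int) (c : Char) : PySem.Dict Char Int :=
  if check.contains c then check.insert c (check.getD c 0 + 1) else check.insert c 1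

-- the 'for i in range(len(numb))' loop; none = the early 'return False'
def pvLoopA : List Char → PySem.Dict Char Int → Option (PySem.Dict Char Int)
  | [], check => some check
  | [c], check => some (pvBumpA check c)
  | c1 :: c2 :: rest, check =>
      if c1 > c2 then none
      else pvLoopA (c2 :: rest) (pvBumpA check c1)

def has_repeating_number (number : Int) (mini : Int) (maxi : Int) : Bool :=
  let numb := PySem.Int.toChars number
  match pvLoopA numb PySem.Dict.empty with
  | none => false
  | some check => check.items.any (fun kv => decide (mini ≤ kv.2 ∧ kv.2 ≤ maxi))

-- ===== PORT B =====
def has_repeating_number_alt (number : Int) (mini : Int) (maxi : Int) : Bool :=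
  let s := PySem.Int.toChars number
  let pairs := s.zip (s.drop 1)
  -- pass 1: 'if any(a > b for a, b in zip(s, s[1:])): return False'
  if pairs.any (fun p => decide (p.1 > p.2)) then false
  else
    -- pass 2: run-length accumulator (runs, run), then 'runs.append(run)'
    let st := pairs.foldl
      (fun (st : List Int × Int) p => if p.1 = p.2 then (st.1, st.2 + 1) else (st.1 ++ [st.2], 1))
      ([], 1)
    let runs := st.1 ++ [st.2]
    runs.any (fun r => decide (mini ≤ r ∧ r ≤ maxi))

-- ===== PRECONDITION & SPEC =====
def Spec_has_repeating_number (number : Int) (mini : Int) (maxi : Int) (out : Bool) : Prop := out = has_repeating_number_alt number mini maxi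
instance (number : Int) (mini : Int) (maxi : Int) (out : Bool) : Decidable (Spec_has_repeating_number number mini maxi out) := by unfold Spec_has_repeating_number; infer_instance

-- ===== CLAIM (what is proved, stated in full; the proofs are below) =====
def Claim_equal_has_repeating_number : Prop := ∀ (number : Int) (mini : Int) (maxi : Int), Dom_has_repeating_number number mini maxi → Spec_has_repeating_number number mini maxi (has_repeating_number number mini maxi)

-- ===== LEMMAS AND PROOFS =====

-- str(number) is never the empty string
theorem pvToDigitsCore_ne_nil (b f n : Nat) (acc : List Char) (h : acc ≠ []) :
    Nat.toDigitsCore b f n acc ≠ [] := by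
  induction f generalizing n acc with
  | zero => simpa [Nat.toDigitsCore]
  | succ f ih =>
    simp only [Nat.toDigitsCore]
    split
    · simp
    · exact ih _ _ (by simp)

theorem pvToChars_ne_nil (n : Int) : PySem.Int.toChars n ≠ [] := by
  unfold PySem.Int.toChars
  split
  · simp
  · unfold Nat.toDigits
    simp only [Nat.toDigitsCore]
    split
    · simp
    · exact pvToDigitsCore_ne_nil _ _ _ _ (by simp)

-- the run structure of a chain: first components are the run heads, second the run lengths
def pvRunsAux : Char → Int → List Char → List (Char × Int)
  | c, k, [] => [(c, k)]
  | c, k, x :: rest => if x = c then pvRunsAux c (k + 1) rest else (c, k) :: pvRunsAux x 1 rest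

-- A's loop returns False exactly when some adjacent pair decreases
theorem pvLoopA_none (cs : List Char) (d : PySem.Dict Char Int)
    (h : (cs.zip (cs.drop 1)).any (fun p => decide (p.1 > p.2)) = true) :
    pvLoopA cs d = none := by
  induction cs generalizing d with
  | nil => simp at h
  | cons c cs' ih =>
    cases cs' with
    | nil => simp at h
    | cons c2 rest =>
      simp only [List.drop_succ_cons, List.drop_zero, List.zip_cons_cons, List.any_cons,
        Bool.or_eq_true, decide_eq_true_eq] at h
      simp only [pvLoopA]
      rcases h with h | h
      · simp [h]
      · split
        · rfl
        · exact ih _ (by simpa using h)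

-- when no adjacent pair decreases, A's loop is a plain fold of the counter update
theorem pvLoopA_some (cs : List Char) (d : PySem.Dict Char Int)
    (h : (cs.zip (cs.drop 1)).any (fun p => decide (p.1 > p.2)) = false) :
    pvLoopA cs d = some (cs.foldl pvBumpA d) := by
  induction cs generalizing d with
  | nil => rfl
  | cons c cs' ih =>
    cases cs' with
    | nil => rfl
    | cons c2 rest =>
      simp only [List.drop_succ_cons, List.drop_zero, List.zip_cons_cons, List.any_cons,
        Bool.or_eq_false_iff, decide_eq_false_iff_not] at h
      simp only [pvLoopA, List.foldl_cons]
      rw [if_neg h.1]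
      exact ih _ (by simpa using h.2)

-- counter fold over a chain: each run contributes one fresh key carrying its run length
theorem pvFold_items (cs : List Char) : ∀ (c : Char) (k : Int) (d0 : PySem.Dict Char Int),
    d0.contains c = false → (∀ y ∈ d0.keys, y < c) →
    ((c :: cs).zip cs).any (fun p => decide (p.1 > p.2)) = false →
    (cs.foldl pvBumpA (d0.insert c k)).items = d0.items ++ pvRunsAux c k cs := by
  induction cs with
  | nil =>
    intro c k d0 hc _ _
    simp [pvRunsAux, PySem.Dict.items_insert_of_not_contains _ _ hc]
  | cons x rest ih =>
    intro c k d0 hc hlt hch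
    simp only [List.zip_cons_cons, List.any_cons, Bool.or_eq_false_iff,
      decide_eq_false_iff_not] at hch
    have hch1 : ¬ x < c := hch.1
    have hch2 : ((x :: rest).zip rest).any (fun p => decide (p.1 > p.2)) = false := by
      simpa using hch.2
    simp only [List.foldl_cons]
    by_cases hxc : x = c
    · subst hxc
      have hb : pvBumpA (d0.insert x k) x = d0.insert x (k + 1) := by
        simp [pvBumpA, PySem.Dict.contains_insert_self, PySem.Dict.getD_insert_self,
          PySem.Dict.insert_insert_self]
      rw [hb, ih x (k + 1) d0 hc hlt hch2]
      simp [pvRunsAux]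
    · have hcx : c < x := lt_of_le_of_ne (not_lt.mp hch1) (fun h => hxc h.symm)
      have hx0 : (d0.insert c k).contains x = false := by
        rw [← Bool.not_eq_true]
        intro hmem
        rcases (PySem.Dict.mem_keys_insert _ _ _ _).mp
          ((PySem.Dict.contains_iff_mem_keys _ _).mp hmem) with h | h
        · exact hxc h
        · exact absurd (hlt _ h) (by simp [not_lt, le_of_lt hcx])
      have hb : pvBumpA (d0.insert c k) x = (d0.insert c k).insert x 1 := by
        simp [pvBumpA, hx0]
      have hlt' : ∀ y ∈ (d0.insert c k).keys, y < x := by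
        intro y hy
        rcases (PySem.Dict.mem_keys_insert _ _ _ _).mp hy with h | h
        · exact h ▸ hcx
        · exact lt_trans (hlt _ h) hcx
      rw [hb, ih x 1 (d0.insert c k) hx0 hlt' hch2,
        PySem.Dict.items_insert_of_not_contains _ _ hc]
      simp [pvRunsAux, hxc]

-- B's run-length accumulator computes the run lengths of pvRunsAux
theorem pvFoldB (cs : List Char) : ∀ (c : Char) (k : Int) (acc : List Int),
    (((c :: cs).zip cs).foldl
        (fun (st : List Int × Int) p => if p.1 = p.2 then (st.1, st.2 + 1) else (st.1 ++ [st.2], 1))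
        (acc, k)).1 ++
      [(((c :: cs).zip cs).foldl
        (fun (st : List Int × Int) p => if p.1 = p.2 then (st.1, st.2 + 1) else (st.1 ++ [st.2], 1))
        (acc, k)).2] = acc ++ (pvRunsAux c k cs).map (·.2) := by
  induction cs with
  | nil => intro c k acc; simp [pvRunsAux]
  | cons x rest ih =>
    intro c k acc
    simp only [List.zip_cons_cons, List.foldl_cons]
    by_cases hcx : c = x
    · subst hcx
      rw [if_pos rfl]
      simpa [pvRunsAux] using ih c (k + 1) acc
    · rw [if_neg (by simpa using hcx)]
      have := ih x 1 (acc ++ [k])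
      simp only [this, pvRunsAux, if_neg (fun (h : x = c) => hcx h.symm)]
      simp

-- the two programs agree for every integer argument
theorem pvMain (number mini maxi : Int) :
    has_repeating_number number mini maxi = has_repeating_number_alt number mini maxi := by
  unfold has_repeating_number has_repeating_number_alt
  obtain ⟨c, rest, hcs⟩ : ∃ c rest, PySem.Int.toChars number = c :: rest := by
    cases h : PySem.Int.toChars number with
    | nil => exact absurd h (pvToChars_ne_nil number)
    | cons c rest => exact ⟨c, rest, rfl⟩
  rw [hcs]
  dsimp only
  by_cases hany : ((c :: rest).zip ((c :: rest).drop 1)).any (fun p => decide (p.1 > p.2)) = true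
  · rw [pvLoopA_none _ _ hany, if_pos (by simpa using hany)]
  · have hf : ((c :: rest).zip ((c :: rest).drop 1)).any (fun p => decide (p.1 > p.2)) = false :=
      Bool.eq_false_iff.mpr hany
    rw [pvLoopA_some _ _ hf, if_neg hany]
    have hdrop : (c :: rest).drop 1 = rest := by simp
    rw [hdrop] at hf
    have hb1 : pvBumpA PySem.Dict.empty c = PySem.Dict.empty.insert c 1 := by
      simp [pvBumpA, PySem.Dict.contains_empty]
    have hitems : (rest.foldl pvBumpA (PySem.Dict.empty.insert c 1)).items =
        pvRunsAux c 1 rest := by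
      have := pvFold_items rest c 1 PySem.Dict.empty (PySem.Dict.contains_empty c)
        (by simp [PySem.Dict.keys_empty]) hf
      simpa using this
    simp only [List.foldl_cons, hb1, hitems, hdrop]
    rw [pvFoldB rest c 1 []]
    simp [List.any_map, Function.comp_def]

-- ===== VERDICT (by name: the statement is the Claim_ definition above) =====
theorem has_repeating_number_spec : Claim_equal_has_repeating_number := by
  intro number mini maxi _
  unfold Spec_has_repeating_number
  exact pvMain number mini maxi
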